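-- pv_equiv track=rewrite | github.com/seulmi0827/seulmi | sesac_python/week2_sm/20 문자열 여러 번 뒤집기.py | solution
-- ===== SOURCE A (Python) =====
-- def solution(my_string, queries):
--     for i in queries:
--         start ,end = i
--         result1 = ''
--         result2 = ''
--         result3 = ''
--         for k in range(len(my_string)):
--             if k < start:
--                 result1 += my_string[k]
--             elif start <= k <=end:
--                 result2 += my_string[k]
--             elif end < k :
--                 result3 += my_string[k]
--         my_string = result1 + result2[::-1] + result3
--
--     return my_string
-- ===== SOURCE B (Python) =====
-- def solution(my_string, queries):
--     lst = list(my_string)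
--     n = len(lst)
--     for start, end in queries:
--         left = max(start, 0)
--         right = min(end, n - 1)
--         while left < right:
--             lst[left], lst[right] = lst[right], lst[left]
--             left += 1
--             right -= 1
--     return ''.join(lst)
-- ===== Notes on version B (the rewrite author's own statement) =====
-- stated objective: faster
-- what changed: Instead of rebuilding three fresh strings character by character over the whole string for every query, B converts the string to a list once and reverses each queried segment in place with a converging two-pointer swap loop, joining once at the end.
import Mathlib
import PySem

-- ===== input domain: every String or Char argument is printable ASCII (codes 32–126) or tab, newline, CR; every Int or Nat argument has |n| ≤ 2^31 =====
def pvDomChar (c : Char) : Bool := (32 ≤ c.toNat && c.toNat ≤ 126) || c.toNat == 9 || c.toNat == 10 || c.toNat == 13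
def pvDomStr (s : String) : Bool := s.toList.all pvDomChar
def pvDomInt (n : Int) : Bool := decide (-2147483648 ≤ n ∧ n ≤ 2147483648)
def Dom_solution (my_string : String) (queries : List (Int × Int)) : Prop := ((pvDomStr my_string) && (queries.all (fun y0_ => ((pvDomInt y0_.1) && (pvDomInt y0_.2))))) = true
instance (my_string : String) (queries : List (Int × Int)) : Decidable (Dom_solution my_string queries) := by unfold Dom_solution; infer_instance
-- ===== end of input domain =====

-- B builds one character list once and reverses each queried segment in place with two pointers,
-- instead of rebuilding three fresh strings character by character for every query.

-- ===== PORT A =====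
-- one iteration of A's outer loop: bucket every index of the string into result1/result2/result3,
-- then concatenate with the middle reversed.  range(len(my_string)) is ported as List.range
-- (exact for a nonnegative length); my_string[k] with 0 ≤ k < len is ported as getD (exact in range);
-- result2[::-1] is ported as List.reverse (exact for the full-reverse slice).
def solA_step (s : List Char) (q : Int × Int) : List Char :=
  let start := q.1
  let en := q.2
  let r := (List.range s.length).foldl
    (fun (acc : List Char × List Char × List Char) (k : Nat) =>
      if (k : Int) < start then (acc.1 ++ [s.getD k ' '], acc.2.1, acc.2.2)
      else if start ≤ (k : Int) ∧ (k : Int) ≤ en then (acc.1, acc.2.1 ++ [s.getD k ' '], acc.2.2)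
      else if en < (k : Int) then (acc.1, acc.2.1, acc.2.2 ++ [s.getD k ' '])
      else acc)
    ([], [], [])
  r.1 ++ r.2.1.reverse ++ r.2.2   -- result1 + result2[::-1] + result3

def solution (my_string : String) (queries : List (Int × Int)) : String :=
  String.ofList (queries.foldl solA_step my_string.toList)

-- ===== PORT B =====
-- the `while left < right` swap loop of Source B (lst[left], lst[right] = lst[right], lst[left])
def solB_loop (lst : List Char) (left right : Int) : List Char :=
  if left < right then
    let cl := lst.getD left.toNat ' '
    let cr := lst.getD right.toNat ' '
    solB_loop ((lst.set left.toNat cr).set right.toNat cl) (left + 1) (right - 1)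
  else lst
termination_by (right - left).toNat
decreasing_by omega

def solution_alt (my_string : String) (queries : List (Int × Int)) : String :=
  let lst := my_string.toList
  let n : Int := lst.length
  String.ofList (queries.foldl (fun l q => solB_loop l (max q.1 0) (min q.2 (n - 1))) lst)

-- ===== PRECONDITION & SPEC =====
def Spec_solution (my_string : String) (queries : List (Int × Int)) (out : String) : Prop := out = solution_alt my_string queries
instance (my_string : String) (queries : List (Int × Int)) (out : String) : Decidable (Spec_solution my_string queries out) := by unfold Spec_solution; infer_instance

-- ===== CLAIM (what is proved, stated in full; the proofs are below) =====
def Claim_equal_solution : Prop := ∀ (my_string : String) (queries : List (Int × Int)), Dom_solution my_string queries → Spec_solution my_string queries (solution my_string queries)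

-- ===== LEMMAS AND PROOFS =====

-- invariant of A's inner fold over range: after the first j indices the three buckets are slices
-- of s, where lo clamps `start` and m clamps `end + 1` into [0, len]
lemma foldA_inv (s : List Char) (a b : Int) (j : Nat) (hj : j ≤ s.length) :
    (List.range j).foldl
      (fun (acc : List Char × List Char × List Char) (k : Nat) =>
        if (k : Int) < a then (acc.1 ++ [s.getD k ' '], acc.2.1, acc.2.2)
        else if a ≤ (k : Int) ∧ (k : Int) ≤ b then (acc.1, acc.2.1 ++ [s.getD k ' '], acc.2.2)
        else if b < (k : Int) then (acc.1, acc.2.1, acc.2.2 ++ [s.getD k ' '])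
        else acc)
      ([], [], [])
    = (s.take (min (min a (s.length : Int)).toNat j),
       (s.take (min (min (b + 1) (s.length : Int)).toNat j)).drop (min a (s.length : Int)).toNat,
       (s.take j).drop (max (min a (s.length : Int)).toNat (min (b + 1) (s.length : Int)).toNat)) := by
  set lo := (min a (s.length : Int)).toNat with hlo
  set m := (min (b + 1) (s.length : Int)).toNat with hm
  induction j with
  | zero => simp
  | succ j ih =>
    have hj' : j < s.length := by omega
    rw [List.range_succ, List.foldl_append, ih (by omega)]
    clear ih
    simp only [List.foldl_cons, List.foldl_nil]
    have hget : s.getD j ' ' = s[j] := List.getD_eq_getElem s ' ' hj'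
    have htake : s.take (j+1) = s.take j ++ [s[j]] := by
      rw [List.take_add_one]; simp [hj']
    by_cases h1 : (j : Int) < a
    · rw [if_pos h1]
      have hjlo : j < lo := by omega
      simp only [Prod.mk.injEq]; refine ⟨?_, ?_, ?_⟩
      · have e1 : min lo (j+1) = j + 1 := by omega
        have e2 : min lo j = j := by omega
        rw [e1, e2, htake, hget]
      · by_cases h2 : m ≤ j
        · have e3 : min m j = m := by omega
          have e4 : min m (j+1) = m := by omega
          rw [e3, e4]
        · have e3 : min m j = j := by omega
          have e4 : min m (j+1) = j + 1 := by omega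
          rw [e3, e4,
            List.drop_eq_nil_of_le (by rw [List.length_take]; omega),
            List.drop_eq_nil_of_le (by rw [List.length_take]; omega)]
      · rw [List.drop_eq_nil_of_le (by rw [List.length_take]; omega),
          List.drop_eq_nil_of_le (by rw [List.length_take]; omega)]
    · by_cases h2 : a ≤ (j : Int) ∧ (j : Int) ≤ b
      · have hlo2 : lo ≤ j := by omega
        have hm2 : j < m := by omega
        rw [if_neg h1, if_pos h2]
        simp only [Prod.mk.injEq]; refine ⟨?_, ?_, ?_⟩
        · have e1 : min lo j = lo := by omega
          have e2 : min lo (j+1) = lo := by omega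
          rw [e1, e2]
        · have e3 : min m j = j := by omega
          have e4 : min m (j+1) = j + 1 := by omega
          rw [e3, e4, htake, List.drop_append_of_le_length (by rw [List.length_take]; omega), hget]
        · rw [List.drop_eq_nil_of_le (by rw [List.length_take]; omega),
            List.drop_eq_nil_of_le (by rw [List.length_take]; omega)]
      · have h3 : b < (j : Int) := by omega
        have hlo2 : lo ≤ j := by omega
        have hm2 : m ≤ j := by omega
        rw [if_neg h1, if_neg h2, if_pos h3]
        simp only [Prod.mk.injEq]; refine ⟨?_, ?_, ?_⟩
        · have e1 : min lo j = lo := by omega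
          have e2 : min lo (j+1) = lo := by omega
          rw [e1, e2]
        · have e3 : min m j = m := by omega
          have e4 : min m (j+1) = m := by omega
          rw [e3, e4]
        · rw [htake, List.drop_append_of_le_length (by rw [List.length_take]; omega), hget]

lemma stepA_char (s : List Char) (a b : Int) :
    solA_step s (a, b)
    = s.take (min a (s.length : Int)).toNat
      ++ ((s.take (min (b + 1) (s.length : Int)).toNat).drop (min a (s.length : Int)).toNat).reverse
      ++ s.drop (max (min a (s.length : Int)).toNat (min (b + 1) (s.length : Int)).toNat) := by
  show _ ++ _ ++ _ = _
  rw [foldA_inv s a b s.length le_rfl]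
  have e1 : min (min a (s.length : Int)).toNat s.length = (min a (s.length : Int)).toNat := by omega
  have e2 : min (min (b+1) (s.length : Int)).toNat s.length = (min (b+1) (s.length : Int)).toNat := by omega
  rw [e1, e2, List.take_length]

lemma loop_spec (s : List Char) (l r : Int) (h0 : 0 ≤ l) (h1 : r < (s.length : Int))
    (h2 : l ≤ r + 1) :
    solB_loop s l r
    = s.take l.toNat ++ ((s.take (r + 1).toNat).drop l.toNat).reverse ++ s.drop (r + 1).toNat := by
  induction s, l, r using solB_loop.induct with
  | case1 s l r hlr cl cr ih =>
    have hlt : l.toNat < r.toNat := by omega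
    have hrn : r.toNat < s.length := by omega
    have hln : l.toNat < s.length := by omega
    set s' := (s.set l.toNat cr).set r.toNat cl with hs'
    have hlen' : s'.length = s.length := by simp [hs']
    rw [solB_loop, if_pos hlr]
    rw [ih (by omega) (by rw [hlen']; omega) (by omega)]
    have hcl : cl = s[l.toNat] := List.getD_eq_getElem s ' ' hln
    have hcr : cr = s[r.toNat] := List.getD_eq_getElem s ' ' hrn
    have eL : (l + 1).toNat = l.toNat + 1 := by omega
    have eR : (r - 1 + 1).toNat = r.toNat := by omega
    have eR1 : (r + 1).toNat = r.toNat + 1 := by omega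
    rw [eL, eR, eR1]
    have t1 : s'.take (l.toNat + 1) = s.take l.toNat ++ [s[r.toNat]] := by
      rw [List.take_add_one]
      have h' : s'[l.toNat]? = some s[r.toNat] := by
        have hl' : l.toNat < s'.length := by omega
        rw [List.getElem?_eq_getElem hl']
        simp [hs', hlt.ne', hcr]
      rw [h', hs', List.take_set_of_le (by omega), List.take_set_of_le (by omega)]
      rfl
    have t2 : s'.drop r.toNat = s[l.toNat] :: s.drop (r.toNat + 1) := by
      rw [List.drop_eq_getElem_cons (by rw [hlen']; omega)]
      congr 1
      · simp [hs', hcl]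
      · rw [hs', List.drop_set_of_lt (by omega), List.drop_set_of_lt (by omega)]
    have t3 : (s'.take r.toNat).drop (l.toNat + 1) = (s.take r.toNat).drop (l.toNat + 1) := by
      rw [hs', List.take_set_of_le (le_refl _), List.take_set, List.drop_set_of_lt (by omega)]
    have t4 : (s.take (r.toNat + 1)).drop l.toNat
        = s[l.toNat] :: ((s.take r.toNat).drop (l.toNat + 1) ++ [s[r.toNat]]) := by
      rw [List.take_add_one]
      have hg : s[r.toNat]?.toList = [s[r.toNat]] := by simp [List.getElem?_eq_getElem hrn]
      rw [hg, List.drop_append_of_le_length (by rw [List.length_take]; omega)]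
      rw [List.drop_eq_getElem_cons (by rw [List.length_take]; omega)]
      rw [List.getElem_take]
      simp
    rw [t1, t2, t3, t4]
    simp [List.reverse_append]
  | case2 s l r hlr =>
    rw [solB_loop, if_neg hlr]
    by_cases he : l = r + 1
    · have e : (r+1).toNat = l.toNat := by omega
      rw [e, List.drop_eq_nil_of_le (by rw [List.length_take]; omega)]
      simp
    · have he2 : l = r := by omega
      subst he2
      have hln : l.toNat < s.length := by omega
      have e : (l+1).toNat = l.toNat + 1 := by omega
      rw [e]
      have htake : s.take (l.toNat+1) = s.take l.toNat ++ [s[l.toNat]] := by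
        rw [List.take_add_one]; simp [List.getElem?_eq_getElem hln]
      have hd : (s.take l.toNat).drop l.toNat = [] :=
        List.drop_eq_nil_of_le (by rw [List.length_take]; omega)
      rw [htake, List.drop_append_of_le_length (by rw [List.length_take]; omega), hd]
      conv_lhs => rw [← List.take_append_drop (l.toNat+1) s]
      rw [htake]
      simp

lemma step_eq (s : List Char) (a b : Int) :
    solA_step s (a, b) = solB_loop s (max a 0) (min b ((s.length : Int) - 1)) := by
  rw [stepA_char]
  set l : Int := max a 0 with hl
  set r : Int := min b ((s.length : Int) - 1) with hr
  by_cases hlr : l < r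
  · rw [loop_spec s l r (by omega) (by omega) (by omega)]
    have e1 : (min a (s.length : Int)).toNat = l.toNat := by omega
    have e2 : (min (b + 1) (s.length : Int)).toNat = (r + 1).toNat := by omega
    rw [e1, e2]
    have e3 : max l.toNat (r + 1).toNat = (r + 1).toNat := by omega
    rw [e3]
  · rw [solB_loop, if_neg hlr]
    by_cases hm : (min (b + 1) (s.length : Int)).toNat ≤ (min a (s.length : Int)).toNat
    · have e3 : max (min a (s.length : Int)).toNat (min (b + 1) (s.length : Int)).toNat
          = (min a (s.length : Int)).toNat := by omega
      rw [e3, List.drop_eq_nil_of_le (by rw [List.length_take]; omega)]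
      simp
    · have he1 : (min a (s.length : Int)).toNat = l.toNat := by omega
      have he2 : (min (b + 1) (s.length : Int)).toNat = l.toNat + 1 := by omega
      have hln : l.toNat < s.length := by omega
      have htake : s.take (l.toNat+1) = s.take l.toNat ++ [s[l.toNat]] := by
        rw [List.take_add_one]; simp [List.getElem?_eq_getElem hln]
      have hd : (s.take l.toNat).drop l.toNat = [] :=
        List.drop_eq_nil_of_le (by rw [List.length_take]; omega)
      rw [he1, he2]
      have he3 : max l.toNat (l.toNat + 1) = l.toNat + 1 := by omega
      rw [he3, htake, List.drop_append_of_le_length (by rw [List.length_take]; omega), hd]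
      conv_rhs => rw [← List.take_append_drop (l.toNat+1) s]
      rw [htake]
      simp

lemma stepA_length (s : List Char) (q : Int × Int) : (solA_step s q).length = s.length := by
  obtain ⟨a, b⟩ := q
  rw [stepA_char]
  simp only [List.length_append, List.length_reverse, List.length_take, List.length_drop]
  omega

-- the two folds agree query by query (B fixes n once; A's step preserves the length)
lemma fold_eq (qs : List (Int × Int)) (s : List Char) (n : Nat) (h : s.length = n) :
    qs.foldl solA_step s
      = qs.foldl (fun l q => solB_loop l (max q.1 0) (min q.2 ((n : Int) - 1))) s := by
  induction qs generalizing s with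
  | nil => rfl
  | cons q qs ih =>
    obtain ⟨a, b⟩ := q
    simp only [List.foldl_cons]
    have hb : solB_loop s (max a 0) (min b ((n : Int) - 1)) = solA_step s (a, b) := by
      rw [step_eq, h]
    rw [hb]
    exact ih _ (by rw [stepA_length]; exact h)

-- ===== VERDICT (by name: the statement is the Claim_ definition above) =====
theorem solution_spec : Claim_equal_solution := by
  intro my_string queries _
  unfold Spec_solution solution solution_alt
  rw [fold_eq queries my_string.toList my_string.toList.length rfl]
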